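-- pv_equiv track=rewrite | github.com/cbv/icfp-2024 | puzzles/spaceship/code/solution_optimizer.py | spaceship_tracker
-- ===== SOURCE A (Python) =====
-- def spaceship_tracker(movement, x = 0, y = 0, vx = 0, vy = 0):
--     results = []
--     results.append((x, y, vx, vy))
--     for key_press in movement:
--         if key_press in ('7', '8', '9'):
--             vy += 1
--         if key_press in ('1', '2', '3'):
--             vy -= 1
--         if key_press in ('3', '6', '9'):
--             vx += 1
--         if key_press in ('1', '4', '7'):
--             vx -= 1
--         x += vx
--         y += vy
--         results.append((x, y, vx, vy))
--     return results
-- ===== SOURCE B (Python) =====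
-- def spaceship_tracker(movement, x=0, y=0, vx=0, vy=0):
--     # two-phase prefix sums: char -> velocity delta, then accumulate velocities, then positions
--     dv = {c: ((d - 1) % 3 - 1, (d - 1) // 3 - 1) for d, c in enumerate('123456789', 1)}
--     deltas = [dv.get(c, (0, 0)) for c in movement]
--     vxs, vys = [vx], [vy]
--     for dvx, dvy in deltas:
--         vxs.append(vxs[-1] + dvx)
--         vys.append(vys[-1] + dvy)
--     xs = [x]
--     for v in vxs[1:]:
--         xs.append(xs[-1] + v)
--     ys = [y]
--     for v in vys[1:]:
--         ys.append(ys[-1] + v)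
--     return list(zip(xs, ys, vxs, vys))
-- ===== Notes on version B (the rewrite author's own statement) =====
-- stated objective: alternative
-- what changed: Replaces the single stateful loop of eight membership tests with a two-phase prefix-sum pipeline: a delta table (digit d -> ((d-1)%3-1,(d-1)//3-1)) maps each character to a velocity delta, running sums fold deltas into velocities and velocities into positions, and the four streams are zipped into the result.
import Mathlib
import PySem

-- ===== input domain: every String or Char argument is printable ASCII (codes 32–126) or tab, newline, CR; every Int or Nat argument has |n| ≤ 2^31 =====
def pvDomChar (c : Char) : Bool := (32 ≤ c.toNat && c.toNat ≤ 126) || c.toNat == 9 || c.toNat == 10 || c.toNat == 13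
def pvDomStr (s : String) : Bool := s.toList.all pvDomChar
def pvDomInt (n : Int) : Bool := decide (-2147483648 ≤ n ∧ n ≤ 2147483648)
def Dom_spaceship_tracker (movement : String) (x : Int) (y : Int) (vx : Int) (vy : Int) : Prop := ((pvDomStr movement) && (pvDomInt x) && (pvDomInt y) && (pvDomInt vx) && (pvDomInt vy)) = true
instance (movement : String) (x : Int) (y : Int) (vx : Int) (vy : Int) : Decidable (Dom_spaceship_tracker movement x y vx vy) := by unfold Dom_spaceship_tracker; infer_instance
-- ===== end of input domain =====

-- B replaces A's stateful loop of eight membership tests by a delta table plus two prefix-sum passes (alternative decomposition, same cost).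
-- ===== PORT A =====
-- the loop body: appends one state per character, threading (x, y, vx, vy)
def pvALoop : List Char → Int → Int → Int → Int → List (Int × Int × Int × Int)
  | [], _, _, _, _ => []
  | c :: rest, x, y, vx, vy =>
    let vy1 := if c = '7' ∨ c = '8' ∨ c = '9' then vy + 1 else vy
    let vy2 := if c = '1' ∨ c = '2' ∨ c = '3' then vy1 - 1 else vy1
    let vx1 := if c = '3' ∨ c = '6' ∨ c = '9' then vx + 1 else vx
    let vx2 := if c = '1' ∨ c = '4' ∨ c = '7' then vx1 - 1 else vx1
    let x' := x + vx2
    let y' := y + vy2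
    (x', y', vx2, vy2) :: pvALoop rest x' y' vx2 vy2

def spaceship_tracker (movement : String) (x : Int) (y : Int) (vx : Int) (vy : Int) : List (Int × Int × Int × Int) :=
  (x, y, vx, vy) :: pvALoop movement.toList x y vx vy

-- ===== PORT B =====
-- dv = {c: ((d-1)%3-1, (d-1)//3-1) for d, c in enumerate('123456789', 1)}
def pvDvTable : PySem.Dict Char (Int × Int) :=
  (PySem.List.enumerate "123456789".toList 1).foldl
    (fun dict p => dict.insert p.2 (PySem.Int.mod (p.1 - 1) 3 - 1, PySem.Int.floordiv (p.1 - 1) 3 - 1))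
    PySem.Dict.empty

-- velocity prefix sums: appends vxs[-1]+dvx, vys[-1]+dvy per delta
def pvVelLoop : List (Int × Int) → Int → Int → List Int × List Int
  | [], _, _ => ([], [])
  | d :: rest, vx, vy =>
    let r := pvVelLoop rest (vx + d.1) (vy + d.2)
    ((vx + d.1) :: r.1, (vy + d.2) :: r.2)

-- position prefix sums: appends last + v per velocity
def pvPosLoop : List Int → Int → List Int
  | [], _ => []
  | v :: rest, p => (p + v) :: pvPosLoop rest (p + v)

def spaceship_tracker_alt (movement : String) (x : Int) (y : Int) (vx : Int) (vy : Int) : List (Int × Int × Int × Int) :=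
  let deltas := movement.toList.map (fun c => pvDvTable.getD c (0, 0))
  let vs := pvVelLoop deltas vx vy
  let xs := pvPosLoop vs.1 x
  let ys := pvPosLoop vs.2 y
  List.zip (x :: xs) (List.zip (y :: ys) (List.zip (vx :: vs.1) (vy :: vs.2)))

-- ===== PRECONDITION & SPEC =====
def Spec_spaceship_tracker (movement : String) (x : Int) (y : Int) (vx : Int) (vy : Int) (out : List (Int × Int × Int × Int)) : Prop := out = spaceship_tracker_alt movement x y vx vy
instance (movement : String) (x : Int) (y : Int) (vx : Int) (vy : Int) (out : List (Int × Int × Int × Int)) : Decidable (Spec_spaceship_tracker movement x y vx vy out) := by unfold Spec_spaceship_tracker; infer_instance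

-- ===== CLAIM (what is proved, stated in full; the proofs are below) =====
def Claim_equal_spaceship_tracker : Prop := ∀ (movement : String) (x : Int) (y : Int) (vx : Int) (vy : Int), Dom_spaceship_tracker movement x y vx vy → Spec_spaceship_tracker movement x y vx vy (spaceship_tracker movement x y vx vy)

-- ===== LEMMAS AND PROOFS =====

-- ===== VERDICT (by name: the statement is the Claim_ definition above) =====
-- per-character step: A's four conditional updates equal adding the table delta
lemma pvStep_eq (c : Char) (vx vy : Int) :
    ((if c = '1' ∨ c = '4' ∨ c = '7' then
        (if c = '3' ∨ c = '6' ∨ c = '9' then vx + 1 else vx) - 1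
      else (if c = '3' ∨ c = '6' ∨ c = '9' then vx + 1 else vx)),
     (if c = '1' ∨ c = '2' ∨ c = '3' then
        (if c = '7' ∨ c = '8' ∨ c = '9' then vy + 1 else vy) - 1
      else (if c = '7' ∨ c = '8' ∨ c = '9' then vy + 1 else vy))) =
    (vx + (pvDvTable.getD c (0, 0)).1, vy + (pvDvTable.getD c (0, 0)).2) := by
  by_cases h1 : c = '1'
  · subst h1; rw [show pvDvTable.getD '1' ((0:Int),(0:Int)) = (-1,-1) by decide]
    simp only [Prod.mk.injEq]; split_ifs <;> simp_all <;> omega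
  by_cases h2 : c = '2'
  · subst h2; rw [show pvDvTable.getD '2' ((0:Int),(0:Int)) = (0,-1) by decide]
    simp only [Prod.mk.injEq]; split_ifs <;> simp_all <;> omega
  by_cases h3 : c = '3'
  · subst h3; rw [show pvDvTable.getD '3' ((0:Int),(0:Int)) = (1,-1) by decide]
    simp only [Prod.mk.injEq]; split_ifs <;> simp_all <;> omega
  by_cases h4 : c = '4'
  · subst h4; rw [show pvDvTable.getD '4' ((0:Int),(0:Int)) = (-1,0) by decide]
    simp only [Prod.mk.injEq]; split_ifs <;> simp_all <;> omega
  by_cases h5 : c = '5'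
  · subst h5; rw [show pvDvTable.getD '5' ((0:Int),(0:Int)) = (0,0) by decide]
    simp only [Prod.mk.injEq]; split_ifs <;> simp_all <;> omega
  by_cases h6 : c = '6'
  · subst h6; rw [show pvDvTable.getD '6' ((0:Int),(0:Int)) = (1,0) by decide]
    simp only [Prod.mk.injEq]; split_ifs <;> simp_all <;> omega
  by_cases h7 : c = '7'
  · subst h7; rw [show pvDvTable.getD '7' ((0:Int),(0:Int)) = (-1,1) by decide]
    simp only [Prod.mk.injEq]; split_ifs <;> simp_all <;> omega
  by_cases h8 : c = '8'
  · subst h8; rw [show pvDvTable.getD '8' ((0:Int),(0:Int)) = (0,1) by decide]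
    simp only [Prod.mk.injEq]; split_ifs <;> simp_all <;> omega
  by_cases h9 : c = '9'
  · subst h9; rw [show pvDvTable.getD '9' ((0:Int),(0:Int)) = (1,1) by decide]
    simp only [Prod.mk.injEq]; split_ifs <;> simp_all <;> omega
  have htab : pvDvTable = PySem.Dict.mk [('1',(-1,-1)),('2',(0,-1)),('3',(1,-1)),('4',(-1,0)),('5',(0,0)),('6',(1,0)),('7',(-1,1)),('8',(0,1)),('9',(1,1))] := by decide
  have hl : pvDvTable.getD c ((0:Int),(0:Int)) = (0,0) := by
    simp [htab, PySem.Dict.getD, h1,h2,h3,h4,h5,h6,h7,h8,h9, Ne.symm, PySem.Dict.get?]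
  rw [hl]; simp [h1,h2,h3,h4,h6,h7,h8,h9]

lemma pvALoop_eq (chars : List Char) : ∀ (x y vx vy : Int),
    pvALoop chars x y vx vy =
      (fun vs => List.zip (pvPosLoop vs.1 x) (List.zip (pvPosLoop vs.2 y) (List.zip vs.1 vs.2)))
        (pvVelLoop (chars.map (fun c => pvDvTable.getD c (0, 0))) vx vy) := by
  induction chars with
  | nil => intro x y vx vy; simp [pvALoop, pvVelLoop, pvPosLoop]
  | cons c rest ih =>
    intro x y vx vy
    have hs := pvStep_eq c vx vy
    simp only [Prod.mk.injEq] at hs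
    simp only [pvALoop, List.map_cons, pvVelLoop, pvPosLoop, List.zip, List.zipWith]
    rw [hs.1, hs.2]; simp only [ih, List.zip]

theorem spaceship_tracker_spec : Claim_equal_spaceship_tracker := by
  intro movement x y vx vy _
  unfold Spec_spaceship_tracker spaceship_tracker spaceship_tracker_alt
  simp only [List.zip, List.zipWith]
  rw [pvALoop_eq]
  rfl
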